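-- pv_equiv track=rewrite | github.com/ramphias/universal-ontology-definition | scripts/validate_governance.py | get_inheritance_depth
-- ===== SOURCE A (Python) =====
-- def get_inheritance_depth(class_id: str, parent_map: dict, memo: dict = None) -> int:
--     """Calculate the inheritance depth of a class."""
--     if memo is None:
--         memo = {}
--     if class_id in memo:
--         return memo[class_id]
--     parent = parent_map.get(class_id)
--     if parent is None:
--         memo[class_id] = 1
--         return 1
--     depth = 1 + get_inheritance_depth(parent, parent_map, memo)
--     memo[class_id] = depth
--     return depth
-- ===== SOURCE B (Python) =====
-- def get_inheritance_depth(class_id: str, parent_map: dict, memo: dict = None) -> int: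
--     """Calculate the inheritance depth of a class (iterative walk instead of recursion)."""
--     if memo is None:
--         memo = {}
--     # walk up the parent chain until a memoized id or an id with no parent
--     chain = []
--     cur = class_id
--     while cur not in memo and cur in parent_map:
--         chain.append(cur)
--         cur = parent_map[cur]
--     if cur in memo:
--         depth = memo[cur]
--     else:
--         depth = 1
--         memo[cur] = 1
--     # walk back down assigning depths
--     for node in reversed(chain):
--         depth += 1
--         memo[node] = depth
--     return depth
-- ===== Notes on version B (the rewrite author's own statement) =====
-- stated objective: alternative
-- what changed: Replaces A's memoized recursion by an iterative two-phase walk: collect the parent chain upward into a list until a memoized id or a parentless id, then assign depths back down the chain into the memo.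
import Mathlib
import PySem

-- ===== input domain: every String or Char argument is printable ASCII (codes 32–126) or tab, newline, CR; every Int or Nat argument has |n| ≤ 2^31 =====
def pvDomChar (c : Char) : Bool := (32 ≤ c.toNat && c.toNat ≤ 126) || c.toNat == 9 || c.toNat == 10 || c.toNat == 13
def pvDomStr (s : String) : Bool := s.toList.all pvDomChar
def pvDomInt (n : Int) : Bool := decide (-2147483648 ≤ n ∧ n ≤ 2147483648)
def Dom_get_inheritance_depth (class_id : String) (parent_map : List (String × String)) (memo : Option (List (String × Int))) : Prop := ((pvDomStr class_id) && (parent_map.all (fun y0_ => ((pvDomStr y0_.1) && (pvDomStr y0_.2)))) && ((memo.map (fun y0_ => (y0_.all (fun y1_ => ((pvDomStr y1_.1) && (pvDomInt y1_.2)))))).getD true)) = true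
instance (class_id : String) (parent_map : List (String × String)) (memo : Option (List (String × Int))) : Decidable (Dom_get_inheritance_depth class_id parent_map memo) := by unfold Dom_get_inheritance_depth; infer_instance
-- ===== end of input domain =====

-- B replaces A's recursion by an iterative two-phase walk (collect the parent chain, then assign
-- depths back down); objective: alternative decomposition, not claimed faster. Both A and B mutate
-- the caller's memo dict identically; the theorems here are about the return value only.

-- ===== PORT A =====
-- A's recursion is not structurally decreasing, so the port carries a fuel argument;
-- fuel parent_map.length + 1 is never exhausted on inputs satisfying Pre_ (acyclic chains).
def goA (parent_map : PySem.Dict String String) : Nat → String → PySem.Dict String Int → Int × PySem.Dict String Int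
  | 0, _, memo => (0, memo)
  | fuel+1, class_id, memo =>
    match memo.get? class_id with
    | some v => (v, memo)
    | none =>
      match parent_map.get? class_id with
      | none => (1, memo.insert class_id 1)
      | some p =>
        let r := goA parent_map fuel p memo
        (1 + r.1, r.2.insert class_id (1 + r.1))

def get_inheritance_depth (class_id : String) (parent_map : List (String × String)) (memo : Option (List (String × Int))) : Int :=
  -- `if memo is None: memo = {}` becomes memo.getD []
  (goA (PySem.Dict.mk parent_map) (parent_map.length + 1) class_id (PySem.Dict.mk (memo.getD []))).1

-- ===== PORT B =====
-- the while loop of Source B (fuel as above); the accumulator conses, so it holds the chain already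
-- reversed and the foldl below is exactly Source B's `for node in reversed(chain)` pass
def goChain (parent_map : PySem.Dict String String) (memo : PySem.Dict String Int) : Nat → String → List String → List String × String
  | 0, cur, acc => (acc, cur)
  | fuel+1, cur, acc =>
    if (memo.get? cur).isNone then
      match parent_map.get? cur with
      | some p => goChain parent_map memo fuel p (cur :: acc)
      | none => (acc, cur)
    else (acc, cur)

-- base depth at the chain's end, then the walk back down (Source B's tail after the while loop)
def finishB (memo : PySem.Dict String Int) (rc : List String × String) : Int × PySem.Dict String Int :=
  let base : Int × PySem.Dict String Int :=
    match memo.get? rc.2 with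
    | some v => (v, memo)
    | none => (1, memo.insert rc.2 1)
  rc.1.foldl (fun st node => (st.1 + 1, st.2.insert node (st.1 + 1))) base

def get_inheritance_depth_alt (class_id : String) (parent_map : List (String × String)) (memo : Option (List (String × Int))) : Int :=
  (finishB (PySem.Dict.mk (memo.getD []))
    (goChain (PySem.Dict.mk parent_map) (PySem.Dict.mk (memo.getD [])) (parent_map.length + 1) class_id [])).1

-- ===== PRECONDITION & SPEC =====
-- Pre_ excludes exactly the inputs on which the parent chain from class_id (stopping at a memoized
-- id or an id without a parent) does not end within parent_map.length + 1 steps, i.e. runs into a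
-- cycle: there Python A raises RecursionError (and Source B's while loop does not terminate).
def chainOk (parent_map : PySem.Dict String String) (memo : PySem.Dict String Int) : Nat → String → Bool
  | 0, _ => false
  | fuel+1, cur =>
    if (memo.get? cur).isNone then
      match parent_map.get? cur with
      | some p => chainOk parent_map memo fuel p
      | none => true
    else true

def Pre_get_inheritance_depth (class_id : String) (parent_map : List (String × String)) (memo : Option (List (String × Int))) : Prop :=
  chainOk (PySem.Dict.mk parent_map) (PySem.Dict.mk (memo.getD [])) (parent_map.length + 1) class_id = true
instance (class_id : String) (parent_map : List (String × String)) (memo : Option (List (String × Int))) : Decidable (Pre_get_inheritance_depth class_id parent_map memo) := by unfold Pre_get_inheritance_depth; infer_instance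

def pvWitness_get_inheritance_depth : String × (List (String × String)) × (Option (List (String × Int))) :=
  ("Dog", [("Dog", "Animal"), ("Cat", "Animal"), ("Animal", "Thing")], some [("Thing", 1)])

def Spec_get_inheritance_depth (class_id : String) (parent_map : List (String × String)) (memo : Option (List (String × Int))) (out : Int) : Prop := out = get_inheritance_depth_alt class_id parent_map memo
instance (class_id : String) (parent_map : List (String × String)) (memo : Option (List (String × Int))) (out : Int) : Decidable (Spec_get_inheritance_depth class_id parent_map memo out) := by unfold Spec_get_inheritance_depth; infer_instance

-- ===== CLAIM (what is proved, stated in full; the proofs are below) =====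
def Claim_equal_get_inheritance_depth : Prop := ∀ (class_id : String) (parent_map : List (String × String)) (memo : Option (List (String × Int))), Dom_get_inheritance_depth class_id parent_map memo → Pre_get_inheritance_depth class_id parent_map memo → Spec_get_inheritance_depth class_id parent_map memo (get_inheritance_depth class_id parent_map memo)

-- ===== LEMMAS AND PROOFS =====

theorem goChain_acc (pm : PySem.Dict String String) (m : PySem.Dict String Int) :
    ∀ (fuel : Nat) (cur : String) (acc : List String),
      goChain pm m fuel cur acc = ((goChain pm m fuel cur []).1 ++ acc, (goChain pm m fuel cur []).2) := by
  intro fuel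
  induction fuel with
  | zero => intro cur acc; simp [goChain]
  | succ f ih =>
    intro cur acc
    simp only [goChain]
    by_cases h : (m.get? cur).isNone
    · simp only [h, if_true]
      cases hp : pm.get? cur with
      | none => simp
      | some p => simp [ih p (cur :: acc), ih p [cur]]
    · simp [h]

theorem goA_eq_finishB (pm : PySem.Dict String String) (m : PySem.Dict String Int) :
    ∀ (fuel : Nat) (cur : String), chainOk pm m fuel cur = true →
      goA pm fuel cur m = finishB m (goChain pm m fuel cur []) := by
  intro fuel
  induction fuel with
  | zero => intro cur h; simp [chainOk] at h
  | succ f ih =>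
    intro cur h
    simp only [chainOk] at h
    simp only [goA, goChain]
    cases hm : m.get? cur with
    | some v => simp [finishB, hm]
    | none =>
      simp only [hm, Option.isNone_none, if_true] at h ⊢
      cases hp : pm.get? cur with
      | none => simp [finishB, hm]
      | some p =>
        simp only [hp] at h ⊢
        rw [ih p h, goChain_acc pm m f p [cur]]
        simp only [finishB, List.foldl_append, List.foldl_cons, List.foldl_nil]
        rw [Int.add_comm 1]

-- ===== VERDICT (by name: the statement is the Claim_ definition above) =====
theorem get_inheritance_depth_spec : Claim_equal_get_inheritance_depth := by
  intro class_id parent_map memo _ hpre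
  unfold Spec_get_inheritance_depth get_inheritance_depth get_inheritance_depth_alt
  rw [goA_eq_finishB _ _ _ _ hpre]
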